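-- pv_equiv track=rewrite | github.com/miliar/Code_Jam_Webscraper | solutions_python/Problem_201/2253.py | answer
-- ===== SOURCE A (Python) =====
-- def binary(n):
--   #n -= 1
--
--   moves = []
--   while n > 1:
--     if n % 2 == 0:
--       moves.append(True) # right
--     else:
--       moves.append(False) # left
--     n //= 2
--   return moves
--
-- def answer(n, k):
--   for is_right in binary(k):
--     n -= 1
--     if is_right:
--       n = n // 2 + n % 2
--     else:
--       n = n // 2
--
--   n -= 1
--   return n // 2 + n % 2, n // 2
-- ===== SOURCE B (Python) =====
-- def answer(n, k):
--     # Closed form: the whole bit-path simulation is one floor division.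
--     if k > 1:
--         t = k.bit_length() - 1
--         p = 1 << t
--         n = (n - (k - p)) // p
--     m = n - 1
--     return ((m + 1) // 2, m // 2)
-- ===== Notes on version B (the rewrite author's own statement) =====
-- stated objective: simpler
-- what changed: A simulates the split one bit of k at a time (building a move list and updating n per move); B collapses the whole simulation into one closed-form floor division n' = (n - (k - 2^(bitlength(k)-1))) // 2^(bitlength(k)-1) and returns ((n'-2)//2+... i.e. the ceil/floor halves of n'-1 directly.
import Mathlib
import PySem

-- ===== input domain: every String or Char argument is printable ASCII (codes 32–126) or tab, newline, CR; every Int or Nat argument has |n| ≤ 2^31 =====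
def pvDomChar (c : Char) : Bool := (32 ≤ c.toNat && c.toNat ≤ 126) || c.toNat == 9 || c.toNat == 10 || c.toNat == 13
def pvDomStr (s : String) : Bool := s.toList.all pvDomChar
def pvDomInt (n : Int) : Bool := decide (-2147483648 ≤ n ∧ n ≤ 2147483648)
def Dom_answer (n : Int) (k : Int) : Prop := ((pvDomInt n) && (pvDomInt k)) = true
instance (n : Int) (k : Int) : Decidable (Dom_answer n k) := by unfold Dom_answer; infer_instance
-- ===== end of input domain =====

-- B replaces A's per-bit simulation loop with a closed-form single floor division (simpler).

-- ===== PORT A =====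
-- while n > 1: append (n % 2 == 0); n //= 2   (moves collected LSB-first)
def binaryA (n : Int) : List Bool :=
  if _h : n > 1 then
    (PySem.Int.mod n 2 == 0) :: binaryA (PySem.Int.floordiv n 2)
  else []
termination_by n.toNat
decreasing_by
  rw [PySem.Int.floordiv_eq_ediv_of_pos (by omega : (0:Int) < 2)]
  omega

-- the 'for is_right in binary(k)' loop of A, folding the same state n
def answerLoopA (moves : List Bool) (n : Int) : Int :=
  match moves with
  | [] => n
  | b :: bs =>
    let n1 := n - 1
    answerLoopA bs
      (if b then PySem.Int.floordiv n1 2 + PySem.Int.mod n1 2 else PySem.Int.floordiv n1 2)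

def answer (n : Int) (k : Int) : Int × Int :=
  let n' := answerLoopA (binaryA k) n
  let m := n' - 1
  (PySem.Int.floordiv m 2 + PySem.Int.mod m 2, PySem.Int.floordiv m 2)

-- ===== PORT B =====
def answer_alt (n : Int) (k : Int) : Int × Int :=
  let n' :=
    if k > 1 then
      let t : Nat := PySem.Int.bitLength k - 1
      let p : Int := (1 : Int) <<< t
      PySem.Int.floordiv (n - (k - p)) p
    else n
  let m := n' - 1
  (PySem.Int.floordiv (m + 1) 2, PySem.Int.floordiv m 2)

-- ===== PRECONDITION & SPEC =====
def Spec_answer (n : Int) (k : Int) (out : Int × Int) : Prop := out = answer_alt n k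
instance (n : Int) (k : Int) (out : Int × Int) : Decidable (Spec_answer n k out) := by unfold Spec_answer; infer_instance

-- ===== CLAIM (what is proved, stated in full; the proofs are below) =====
def Claim_equal_answer : Prop := ∀ (n : Int) (k : Int), Dom_answer n k → Spec_answer n k (answer n k)

-- ===== LEMMAS AND PROOFS =====

theorem binaryA_nonpos {n : Int} (h : ¬ n > 1) : binaryA n = [] := by
  rw [binaryA]; simp [h]

theorem binaryA_natCast (m : Nat) (h : 2 ≤ m) :
    binaryA (m : Int) = (((m % 2 : Nat) : Int) == 0) :: binaryA ((m / 2 : Nat) : Int) := by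
  rw [binaryA]
  have h1 : (m : Int) > 1 := by exact_mod_cast h
  simp only [h1, dif_pos]
  rw [show PySem.Int.mod (m:Int) 2 = ((m % 2 : Nat) : Int) from
        by exact_mod_cast PySem.Int.mod_natCast m 2,
      show PySem.Int.floordiv (m:Int) 2 = ((m / 2 : Nat) : Int) from
        by exact_mod_cast PySem.Int.floordiv_natCast m 2]

-- one step of A's loop is a single floor division by 2 of (n minus the current bit)
theorem step_eq (m : Nat) (n : Int) :
    (if (((m % 2 : Nat) : Int) == 0)
      then PySem.Int.floordiv (n - 1) 2 + PySem.Int.mod (n - 1) 2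
      else PySem.Int.floordiv (n - 1) 2)
    = (n - ((m % 2 : Nat) : Int)) / 2 := by
  rw [PySem.Int.floordiv_eq_ediv_of_pos (by omega : (0:Int) < 2),
      PySem.Int.mod_eq_emod_of_pos (by omega : (0:Int) < 2)]
  rcases Nat.mod_two_eq_zero_or_one m with h | h <;> simp [h] <;> try omega

-- the whole loop collapses to one floor division by 2^(bitLength m - 1)
theorem loopA_closed (m : Nat) (h : 2 ≤ m) (n : Int) :
    answerLoopA (binaryA (m : Int)) n
      = (n - ((m : Int) - 2 ^ (PySem.Int.bitLength (m : Int) - 1)))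
          / 2 ^ (PySem.Int.bitLength (m : Int) - 1) := by
  induction m using Nat.strong_induction_on generalizing n with
  | _ m ih =>
    rw [binaryA_natCast m h, answerLoopA]
    rw [step_eq m n]
    rw [PySem.Int.bitLength_natCast (by omega : 0 < m)]
    by_cases h2 : 2 ≤ m / 2
    · -- recursive case
      rw [ih (m / 2) (by omega) h2]
      set t := PySem.Int.bitLength ((m / 2 : Nat) : Int) - 1 with ht
      have key : (n - ((m % 2 : Nat) : Int)) / 2 - ((((m / 2 : Nat)) : Int) - 2 ^ t)
          = (n - ((m : Int) - 2 ^ (t + 1))) / 2 := by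
        have := Int.add_mul_ediv_right (n - ((m % 2 : Nat) : Int))
          (-((((m / 2 : Nat)) : Int) - 2 ^ t)) (by omega : (2:Int) ≠ 0)
        have hm : ((m : Int)) = ((m / 2 : Nat) : Int) * 2 + ((m % 2 : Nat) : Int) := by
          push_cast; omega
        rw [show n - ((m : Int) - 2 ^ (t + 1))
              = n - ((m % 2 : Nat) : Int) + -((((m / 2 : Nat)) : Int) - 2 ^ t) * 2 from
            by rw [hm]; ring]
        omega
      rw [key, Int.ediv_ediv_of_nonneg (by omega : (0:Int) ≤ 2)]
      have hb : PySem.Int.bitLength ((m / 2 : Nat) : Int)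
          = PySem.Int.bitLength ((m / 2 / 2 : Nat) : Int) + 1 :=
        PySem.Int.bitLength_natCast (by omega : 0 < m / 2)
      have ht1 : PySem.Int.bitLength ((m / 2 : Nat) : Int) + 1 - 1 = t + 1 := by omega
      rw [ht1, pow_succ]
      ring_nf
    · -- m / 2 = 1, i.e. m ∈ {2, 3}
      have hm1 : m / 2 = 1 := by omega
      rw [hm1]
      rw [binaryA_nonpos (by norm_num : ¬ ((1:Nat):Int) > 1), answerLoopA]
      rw [show PySem.Int.bitLength ((1:Nat):Int) = 1 from by decide]
      have : m = 2 ∨ m = 3 := by omega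
      rcases this with h | h <;> subst h <;> norm_num

-- ===== VERDICT (by name: the statement is the Claim_ definition above) =====
theorem answer_spec : Claim_equal_answer := by
  unfold Claim_equal_answer Spec_answer
  intro n k _
  unfold answer answer_alt
  by_cases hk : k > 1
  · -- k ≥ 2: loop = closed form
    have hk2 : 2 ≤ k.toNat := by omega
    have hkc : ((k.toNat : Nat) : Int) = k := by omega
    have hclosed := loopA_closed k.toNat hk2 n
    rw [hkc] at hclosed
    simp only [hk, if_pos]
    rw [hclosed]
    have hsh : ((1 : Int) <<< (PySem.Int.bitLength k - 1))
        = 2 ^ (PySem.Int.bitLength k - 1) := by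
      rw [Int.shiftLeft_eq]; ring
    rw [hsh]
    have hp : (0:Int) < 2 ^ (PySem.Int.bitLength k - 1) := by positivity
    rw [PySem.Int.floordiv_eq_ediv_of_pos hp]
    set q : Int := (n - (k - 2 ^ (PySem.Int.bitLength k - 1))) / 2 ^ (PySem.Int.bitLength k - 1)
    rw [PySem.Int.floordiv_eq_ediv_of_pos (by omega : (0:Int) < 2),
        PySem.Int.floordiv_eq_ediv_of_pos (by omega : (0:Int) < 2),
        PySem.Int.mod_eq_emod_of_pos (by omega : (0:Int) < 2)]
    rw [Prod.mk.injEq]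
    exact ⟨by omega, rfl⟩
  · -- k ≤ 1: no moves
    rw [binaryA_nonpos hk, answerLoopA]
    simp only [hk, if_neg, not_false_iff]
    rw [PySem.Int.floordiv_eq_ediv_of_pos (by omega : (0:Int) < 2),
        PySem.Int.floordiv_eq_ediv_of_pos (by omega : (0:Int) < 2),
        PySem.Int.mod_eq_emod_of_pos (by omega : (0:Int) < 2)]
    rw [Prod.mk.injEq]
    exact ⟨by omega, rfl⟩
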